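-- pv_equiv track=rewrite | github.com/msydoruk/MetalReleaseTrackerMicroservices | scripts/verify_paragonrecords_selectors.py | strip_format_suffix
-- ===== SOURCE A (Python) =====
-- FORMAT_TOKENS = [
--     "CASSETTE", "DIGIPAK", "DIGISLEEVE", "GATEFOLD", "DOUBLE", "DIGI",
--     "COLOURED", "COLORED", "DLP", "LP", "DCD", "CD", "EP", "TAPE",
-- ]
--
-- def strip_format_suffix(text):
--     result = text.rstrip()
--     changed = True
--     while changed and result:
--         changed = False
--         for token in FORMAT_TOKENS:
--             if result.upper().endswith(f" {token}"):
--                 result = result[:-(len(token) + 1)].rstrip()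
--                 changed = True
--                 break
--     return result if result else text.rstrip()
-- ===== SOURCE B (Python) =====
-- FORMAT_TOKENS = [
--     "CASSETTE", "DIGIPAK", "DIGISLEEVE", "GATEFOLD", "DOUBLE", "DIGI",
--     "COLOURED", "COLORED", "DLP", "LP", "DCD", "CD", "EP", "TAPE",
-- ]
--
-- _TOKEN_SET = frozenset(FORMAT_TOKENS)
--
-- def strip_format_suffix(text):
--     s = text.rstrip()
--     # Stage 1: one forward pass splitting s into maximal runs of
--     # whitespace / non-whitespace characters (order preserved).
--     runs = []
--     cur = ''
--     for ch in s:
--         if cur and (cur[-1].isspace() != ch.isspace()):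
--             runs.append(cur)
--             cur = ''
--         cur += ch
--     if cur:
--         runs.append(cur)
--     # Stage 2: pop trailing (whitespace-run, word) pairs while the word is a
--     # format token and the whitespace run ends with a literal space.
--     while len(runs) >= 2 and runs[-1].upper() in _TOKEN_SET and runs[-2][-1] == ' ':
--         runs.pop()
--         runs.pop()
--     stripped = ''.join(runs)
--     return stripped if stripped else s
-- ===== Notes on version B (the rewrite author's own statement) =====
-- stated objective: alternative
-- what changed: A repeatedly mutates the string (endswith-scan of all 14 tokens, slice, rstrip, restart) until nothing matches; B makes two staged passes over a different structure: one forward pass grouping the string into whitespace/word runs, then popping trailing (whitespace-run, token-word) pairs off that run list and joining once.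
import Mathlib
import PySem

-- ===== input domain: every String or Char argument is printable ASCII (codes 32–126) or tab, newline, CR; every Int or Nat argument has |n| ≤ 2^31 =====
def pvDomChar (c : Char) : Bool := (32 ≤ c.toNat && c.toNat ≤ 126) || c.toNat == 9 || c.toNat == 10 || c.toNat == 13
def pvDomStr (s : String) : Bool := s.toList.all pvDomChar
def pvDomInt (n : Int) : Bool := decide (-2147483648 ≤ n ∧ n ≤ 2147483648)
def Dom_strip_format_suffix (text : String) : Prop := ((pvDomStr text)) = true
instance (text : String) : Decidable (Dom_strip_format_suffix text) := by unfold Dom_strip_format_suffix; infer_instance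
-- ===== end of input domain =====

-- B replaces A's repeated strip-and-rescan of the string by two staged passes: one forward
-- pass grouping the string into whitespace/word runs, then popping trailing (whitespace, token)
-- run pairs and joining once (objective: alternative decomposition, no repeated string rescans).

-- FORMAT_TOKENS (shared module constant of both Pythons)
def formatTokens : List (List Char) :=
  ["CASSETTE".toList, "DIGIPAK".toList, "DIGISLEEVE".toList, "GATEFOLD".toList,
   "DOUBLE".toList, "DIGI".toList, "COLOURED".toList, "COLORED".toList,
   "DLP".toList, "LP".toList, "DCD".toList, "CD".toList, "EP".toList, "TAPE".toList]

-- ===== PORT A =====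
-- while changed and result: scan FORMAT_TOKENS in order; first token with
-- result.upper().endswith(" "+token) strips result[:-(len(token)+1)].rstrip() and restarts.
-- Fuel = |result|+1 suffices: each successful pass removes ≥ 3 characters.
def stripLoopA : Nat → List Char → List Char
  | 0, r => r
  | f + 1, r =>
    if r = [] then r
    else
      match formatTokens.find? (fun t => PySem.Chars.endswith (PySem.Chars.upper r) (' ' :: t)) with
      | some t => stripLoopA f (PySem.Chars.rstrip (PySem.Chars.slice r none (some (-((t.length : Int) + 1)))))
      | none => r

def strip_format_suffix (text : String) : String :=
  let r0 := PySem.Chars.rstrip text.toList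
  let res := stripLoopA (r0.length + 1) r0
  if res = [] then String.ofList r0 else String.ofList res

-- ===== PORT B =====
-- Stage 1 of Source B: the for-loop grouping s into maximal whitespace/non-whitespace runs;
-- state = (runs, cur), flushed when the class of ch differs from the class of cur's last char.
def runStep (st : List (List Char) × List Char) (ch : Char) : List (List Char) × List Char :=
  if st.2 ≠ [] ∧ PySem.Chars.isspace (st.2.getLastD ' ') ≠ PySem.Chars.isspace ch then
    (st.1 ++ [st.2], [ch])
  else (st.1, st.2 ++ [ch])

def runsOf (s : List Char) : List (List Char) :=
  let st := s.foldl runStep ([], [])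
  if st.2 ≠ [] then st.1 ++ [st.2] else st.1

-- Stage 2 of Source B: while len(runs) >= 2 and runs[-1].upper() in _TOKEN_SET and runs[-2][-1] == ' ':
-- pop the trailing (whitespace-run, word) pair.  _TOKEN_SET = frozenset(FORMAT_TOKENS).
def popPairs (runs : List (List Char)) : List (List Char) :=
  if h : 2 ≤ runs.length ∧
      PySem.Set.contains (PySem.Set.ofList formatTokens) (PySem.Chars.upper (runs.getLastD [])) = true ∧
      (runs.dropLast.getLastD []).getLastD ' ' = ' ' then
    popPairs runs.dropLast.dropLast
  else runs
termination_by runs.length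
decreasing_by
  have := h.1
  simp only [List.length_dropLast]
  omega

def strip_format_suffix_alt (text : String) : String :=
  let s := PySem.Chars.rstrip text.toList
  let runs := runsOf s
  let stripped := (popPairs runs).flatten
  if stripped = [] then String.ofList s else String.ofList stripped

-- ===== PRECONDITION & SPEC =====
def Spec_strip_format_suffix (text : String) (out : String) : Prop := out = strip_format_suffix_alt text
instance (text : String) (out : String) : Decidable (Spec_strip_format_suffix text out) := by unfold Spec_strip_format_suffix; infer_instance

-- ===== CLAIM (what is proved, stated in full; the proofs are below) =====
def Claim_equal_strip_format_suffix : Prop := ∀ (text : String), Dom_strip_format_suffix text → Spec_strip_format_suffix text (strip_format_suffix text)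

-- ===== LEMMAS AND PROOFS =====

-- class of a run: whitespace (true) or word (false)
def runCls (r : List Char) : Bool := PySem.Chars.isspace (r.headD ' ')

-- runs are nonempty, homogeneous in class, and adjacent runs alternate
def GoodRuns (l : List (List Char)) : Prop :=
  List.IsChain (fun a b => runCls a ≠ runCls b) l ∧
  ∀ r ∈ l, r ≠ [] ∧ ∀ c ∈ r, PySem.Chars.isspace c = runCls r

theorem upperChar_eq_space_iff (c : Char) : PySem.Chars.upperChar c = ' ' ↔ c = ' ' := by
  simp only [PySem.Chars.upperChar, PySem.Chars.islower]
  split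
  · rename_i h
    simp only [Bool.and_eq_true, decide_eq_true_eq] at h
    have h1 : 97 ≤ c.toNat ∧ c.toNat ≤ 122 := by
      obtain ⟨ha, hb⟩ := h
      rw [Char.le_def, UInt32.le_iff_toNat_le] at ha hb
      exact ⟨ha, hb⟩
    have h32 : (' ').toNat = 32 := by decide
    constructor
    · intro he
      have h2 := congrArg Char.toNat he
      rw [Char.toNat_ofNat, if_pos (Or.inl (by omega))] at h2
      exfalso; omega
    · intro he; subst he; exfalso; omega
  · exact Iff.rfl

theorem isspace_iff (c : Char) : PySem.Chars.isspace c = true ↔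
    (c.toNat = 32 ∨ (9 ≤ c.toNat ∧ c.toNat ≤ 13) ∨ (28 ≤ c.toNat ∧ c.toNat ≤ 31) ∨
     c.toNat = 133 ∨ c.toNat = 160 ∨ c.toNat = 5760 ∨ (8192 ≤ c.toNat ∧ c.toNat ≤ 8202) ∨
     c.toNat = 8232 ∨ c.toNat = 8233 ∨ c.toNat = 8239 ∨ c.toNat = 8287 ∨ c.toNat = 12288) := by
  simp [PySem.Chars.isspace]
  tauto

theorem isspace_upperChar (c : Char) :
    PySem.Chars.isspace (PySem.Chars.upperChar c) = PySem.Chars.isspace c := by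
  simp only [PySem.Chars.upperChar, PySem.Chars.islower]
  split
  · rename_i h
    simp only [Bool.and_eq_true, decide_eq_true_eq] at h
    have h1 : 97 ≤ c.toNat ∧ c.toNat ≤ 122 := by
      obtain ⟨ha, hb⟩ := h
      rw [Char.le_def, UInt32.le_iff_toNat_le] at ha hb
      exact ⟨ha, hb⟩
    have h2 : (Char.ofNat (c.toNat - 32)).toNat = c.toNat - 32 := by
      rw [Char.toNat_ofNat, if_pos (Or.inl (by omega))]
    rw [Bool.eq_iff_iff, isspace_iff, isspace_iff, h2]
    omega
  · rfl

theorem mem_space_upper_iff (r : List Char) : ' ' ∈ PySem.Chars.upper r ↔ ' ' ∈ r := by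
  simp only [PySem.Chars.upper, List.mem_map]
  constructor
  · rintro ⟨c, hc, he⟩; rwa [(upperChar_eq_space_iff c).1 he] at hc
  · intro h; exact ⟨' ', h, (upperChar_eq_space_iff ' ').2 rfl⟩

theorem suffix_of_cons (l : List Char) (c : Char) (w : List Char)
    (h : l <:+ c :: w) (hl : l.length ≤ w.length) : l <:+ w := by
  rcases h with ⟨p, hp⟩
  cases p with
  | nil => simp at hp; subst hp; simp at hl
  | cons x p' => refine ⟨p', ?_⟩; simpa using congrArg List.tail hp

theorem suffix_space_iff (x w t : List Char) (hw : ' ' ∉ w) (ht : ' ' ∉ t) :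
    (' ' :: t <:+ x ++ ' ' :: w) ↔ t = w := by
  constructor
  · intro h
    have h2 : ' ' :: w <:+ x ++ ' ' :: w := ⟨x, rfl⟩
    by_cases hl : t.length ≤ w.length
    · have hst : ' ' :: t <:+ ' ' :: w := List.suffix_of_suffix_length_le h h2 (by simp; omega)
      by_cases hlt : t.length < w.length
      · exfalso
        have hsw := suffix_of_cons _ _ _ hst (by simp; omega)
        exact hw (hsw.subset List.mem_cons_self)
      · rcases hst with ⟨p, hp⟩
        have hpn : p = [] := by
          have hlen := congrArg List.length hp
          simp at hlen
          exact List.length_eq_zero_iff.1 (by omega)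
        subst hpn
        simpa using hp
    · exfalso
      have hws : ' ' :: w <:+ ' ' :: t := List.suffix_of_suffix_length_le h2 h (by simp; omega)
      have hsw := suffix_of_cons _ _ _ hws (by simp; omega)
      exact ht (hsw.subset List.mem_cons_self)
  · rintro rfl; exact ⟨x, rfl⟩

theorem tokens_upper_bool :
    (formatTokens.all (fun t => t.all (fun c => decide (65 ≤ c.toNat) && decide (c.toNat ≤ 90)))) = true := by
  decide

theorem tokens_upper_range : ∀ t ∈ formatTokens, ∀ c ∈ t, 65 ≤ c.toNat ∧ c.toNat ≤ 90 := by
  intro t ht c hc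
  have h2 := List.all_eq_true.mp (List.all_eq_true.mp tokens_upper_bool t ht) c hc
  simp at h2
  exact h2

theorem tokens_no_space : ∀ t ∈ formatTokens, ' ' ∉ t := by
  intro t ht hsp
  have hr := tokens_upper_range t ht ' ' hsp
  have h32 : (' ' : Char).toNat = 32 := by decide
  omega

theorem tokens_no_ws : ∀ t ∈ formatTokens, ∀ c ∈ t, PySem.Chars.isspace c = false := by
  intro t ht c hc
  have hr := tokens_upper_range t ht c hc
  rw [Bool.eq_false_iff]
  intro hs
  have h2 := (isspace_iff c).1 hs
  omega

set_option maxRecDepth 10000 in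
theorem tokens_nodup : formatTokens.Nodup := by decide

theorem find?_tokens (l : List (List Char)) (x w : List Char)
    (hl : ∀ t ∈ l, ' ' ∉ t) (hw : ' ' ∉ w) :
    l.find? (fun t => PySem.Chars.endswith (x ++ ' ' :: w) (' ' :: t))
      = if w ∈ l then some w else none := by
  induction l with
  | nil => simp
  | cons t ts ih =>
    have hpt : (PySem.Chars.endswith (x ++ ' ' :: w) (' ' :: t) = true) ↔ t = w := by
      rw [PySem.Chars.endswith_iff]
      exact suffix_space_iff x w t hw (hl t List.mem_cons_self)
    by_cases he : t = w
    · subst he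
      rw [List.find?_cons_of_pos (by rw [hpt]), if_pos List.mem_cons_self]
    · rw [List.find?_cons_of_neg (by rw [hpt]; exact he),
        ih (fun t' ht' => hl t' (List.mem_cons_of_mem _ ht'))]
      have hmm : (w ∈ t :: ts) ↔ w ∈ ts := by
        simp only [List.mem_cons]
        constructor
        · rintro (h | h)
          · exact absurd h.symm he
          · exact h
        · exact Or.inr
      by_cases hm : w ∈ ts
      · rw [if_pos hm, if_pos (hmm.2 hm)]
      · rw [if_neg hm, if_neg (fun hh => hm (hmm.1 hh))]

-- no " TOKEN" suffix when the separator before the last word is whitespace other than ' '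
theorem not_suffix_space_sep (u : List Char) (uc : Char) (uw t : List Char)
    (huc1 : uc ≠ ' ') (huc2 : PySem.Chars.isspace uc = true)
    (huw : ∀ a ∈ uw, PySem.Chars.isspace a = false)
    (ht : ∀ a ∈ t, PySem.Chars.isspace a = false) :
    ¬ (' ' :: t <:+ u ++ uc :: uw) := by
  intro h
  have h2 : uc :: uw <:+ u ++ uc :: uw := ⟨u, rfl⟩
  by_cases hl : t.length + 1 ≤ uw.length
  · have hst : ' ' :: t <:+ uc :: uw := List.suffix_of_suffix_length_le h h2 (by simp; omega)
    have hsw := suffix_of_cons _ _ _ hst (by simp; omega)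
    exact absurd (huw ' ' (hsw.subset List.mem_cons_self)) (by decide)
  · by_cases he : t.length = uw.length
    · have hst : ' ' :: t <:+ uc :: uw := List.suffix_of_suffix_length_le h h2 (by simp; omega)
      have heq : ' ' :: t = uc :: uw := List.IsSuffix.eq_of_length hst (by simp [he])
      exact huc1 ((List.cons.injEq _ _ _ _ ▸ heq).1).symm
    · have hws : uc :: uw <:+ ' ' :: t := List.suffix_of_suffix_length_le h2 h (by simp; omega)
      have hsw := suffix_of_cons _ _ _ hws (by simp; omega)
      have h3 := ht uc (hsw.subset List.mem_cons_self)
      rw [h3] at huc2; exact Bool.false_ne_true huc2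

theorem upper_append_split (a : List Char) (c : Char) (w : List Char) :
    PySem.Chars.upper (a ++ c :: w)
      = PySem.Chars.upper a ++ PySem.Chars.upperChar c :: PySem.Chars.upper w := by
  simp [PySem.Chars.upper]

theorem slice_take_split (a w : List Char) :
    PySem.List.slice (a ++ ' ' :: w) none (some (-((w.length : Int) + 1))) = a := by
  have hcl : PySem.List.clampIdx (a ++ ' ' :: w).length (-((w.length : Int) + 1)) = a.length := by
    simp only [PySem.List.clampIdx, List.length_append, List.length_cons]
    split_ifs with h1 h2 <;> omega
  simp only [PySem.List.slice, hcl, Nat.sub_zero, List.drop_zero]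
  simpa using List.take_left a (' ' :: w)

theorem rstrip_append_ws (y z : List Char) (hz : ∀ c ∈ z, PySem.Chars.isspace c = true) :
    PySem.Chars.rstrip (y ++ z) = PySem.Chars.rstrip y := by
  simp only [PySem.Chars.rstrip, List.reverse_append]
  rw [List.dropWhile_append, List.dropWhile_eq_nil_iff.2 (by intro c hc; exact hz c (by simpa using hc))]
  simp

theorem rstrip_eq_self (y : List Char) (hy : ∀ h : y ≠ [], PySem.Chars.isspace (y.getLast h) = false) :
    PySem.Chars.rstrip y = y := by
  induction y using List.reverseRecOn with
  | nil => rfl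
  | append_singleton l a _ =>
    have ha : PySem.Chars.isspace a = false := by
      have h1 := hy (by simp)
      rwa [List.getLast_append_of_ne_nil (by simp) (by simp : ([a] : List Char) ≠ [])] at h1
    simp only [PySem.Chars.rstrip, List.reverse_append, List.reverse_singleton,
      List.singleton_append, List.dropWhile_cons, ha]
    simp

theorem rstrip_last (t : List Char) :
    ∀ h : PySem.Chars.rstrip t ≠ [], PySem.Chars.isspace ((PySem.Chars.rstrip t).getLast h) = false := by
  intro h
  simp only [PySem.Chars.rstrip] at h ⊢
  rw [List.getLast_reverse]
  have hne : (List.dropWhile PySem.Chars.isspace t.reverse) ≠ [] := by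
    intro hc; rw [hc] at h; simp at h
  have h2 := List.head_dropWhile_not PySem.Chars.isspace hne
  simpa using h2

theorem stripLoopA_nil (f : Nat) : stripLoopA f [] = [] := by
  cases f <;> simp [stripLoopA]

theorem length_le_flatten (l : List (List Char)) (h : ∀ r ∈ l, r ≠ []) :
    l.length ≤ l.flatten.length := by
  induction l with
  | nil => simp
  | cons r rs ih =>
    have hr : 1 ≤ r.length := by
      have h1 := h r List.mem_cons_self
      cases r with
      | nil => simp at h1
      | cons a b => simp
    simp only [List.flatten_cons, List.length_cons, List.length_append]
    have h2 := ih (fun r hr => h r (List.mem_cons_of_mem _ hr))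
    omega

theorem goodRuns_concat_parts (p : List (List Char)) (x w : List Char)
    (h : GoodRuns (p ++ [x, w])) :
    GoodRuns p ∧ (∀ r ∈ p.getLast?, runCls r ≠ runCls x) ∧ runCls x ≠ runCls w ∧
      (x ≠ [] ∧ ∀ c ∈ x, PySem.Chars.isspace c = runCls x) ∧
      (w ≠ [] ∧ ∀ c ∈ w, PySem.Chars.isspace c = runCls w) := by
  obtain ⟨hc, hm⟩ := h
  rw [List.isChain_append] at hc
  refine ⟨⟨hc.1, fun r hr => hm r (List.mem_append_left _ hr)⟩, ?_, ?_, ?_, ?_⟩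
  · intro r hr
    exact hc.2.2 r hr x rfl
  · exact hc.2.1.rel_head? rfl
  · exact hm x (List.mem_append_right _ (by simp))
  · exact hm w (List.mem_append_right _ (by simp))

theorem flatten_getLast_ne_space (p : List (List Char)) (hg : GoodRuns p)
    (hl : ∀ r ∈ p.getLast?, runCls r = false) :
    ∀ h : p.flatten ≠ [], PySem.Chars.isspace (p.flatten.getLast h) = false := by
  intro h
  induction p using List.reverseRecOn with
  | nil => simp at h
  | append_singleton q lw _ =>
    have hlw := hg.2 lw (List.mem_append_right _ (by simp))
    have hcls : runCls lw = false := hl lw (by simp)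
    have hlwne : lw ≠ [] := hlw.1
    have hfl : (q ++ [lw]).flatten = q.flatten ++ lw := by simp
    rw [List.getLast_congr _ (by simp [hfl] at h ⊢; tauto) hfl,
      List.getLast_append_of_ne_nil _ hlwne]
    exact hcls ▸ hlw.2 _ (List.getLast_mem hlwne)

theorem popPairs_concat_pos (p : List (List Char)) (x w : List Char)
    (hcond : PySem.Chars.upper w ∈ formatTokens ∧ x.getLast? = some ' ') :
    popPairs (p ++ [x, w]) = popPairs p := by
  have h1 : p ++ [x, w] = (p ++ [x]) ++ [w] := by simp
  have hC : 2 ≤ (p ++ [x, w]).length ∧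
      PySem.Set.contains (PySem.Set.ofList formatTokens) (PySem.Chars.upper ((p ++ [x, w]).getLastD [])) = true ∧
      (((p ++ [x, w]).dropLast).getLastD []).getLastD ' ' = ' ' := by
    refine ⟨by simp, ?_, ?_⟩
    · rw [h1, List.getLastD_concat]
      simp only [PySem.Set.contains, PySem.Set.ofList_eq_self_of_nodup formatTokens tokens_nodup]
      exact List.elem_eq_true_of_mem hcond.1
    · rw [h1, List.dropLast_concat, List.getLastD_concat,
        List.getLastD_eq_getLast?, hcond.2]
      rfl
  rw [popPairs, dif_pos hC, h1, List.dropLast_concat, List.dropLast_concat]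

theorem popPairs_concat_neg (p : List (List Char)) (x w : List Char)
    (hx : x ≠ []) (hcond : ¬ (PySem.Chars.upper w ∈ formatTokens ∧ x.getLast? = some ' ')) :
    popPairs (p ++ [x, w]) = p ++ [x, w] := by
  have h1 : p ++ [x, w] = (p ++ [x]) ++ [w] := by simp
  rw [popPairs, dif_neg]
  intro ⟨_, h2, h3⟩
  rw [h1, List.getLastD_concat] at h2
  rw [h1, List.dropLast_concat, List.getLastD_concat, List.getLastD_eq_getLast?] at h3
  apply hcond
  constructor
  · simp only [PySem.Set.contains, PySem.Set.ofList_eq_self_of_nodup formatTokens tokens_nodup] at h2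
    exact List.mem_of_elem_eq_true h2
  · cases hgl : x.getLast? with
    | none => rw [List.getLast?_eq_none_iff] at hgl; exact absurd hgl hx
    | some c => rw [hgl] at h3; simp at h3; rw [h3]

theorem popPairs_single (w : List Char) : popPairs [w] = [w] := by
  rw [popPairs, dif_neg]; intro h; simp at h

theorem popPairs_nil : popPairs [] = [] := by
  rw [popPairs, dif_neg]; intro h; simp at h

-- main loop correspondence: on a good run decomposition, A's strip loop computes
-- the flattening of B's pair-popped run list
theorem main_loop : ∀ (n : Nat) (rs : List (List Char)) (f : Nat), rs.length ≤ n →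
    GoodRuns rs → (∀ r ∈ rs.getLast?, runCls r = false) → rs.length ≤ f →
    stripLoopA f rs.flatten = (popPairs rs).flatten := by
  intro n
  induction n with
  | zero =>
    intro rs f hn _ _ _
    have hnil : rs = [] := List.length_eq_zero_iff.1 (by omega)
    subst hnil
    simp [stripLoopA_nil, popPairs_nil]
  | succ n ih =>
    intro rs f hn hg hlast hf
    rcases List.eq_nil_or_concat' rs with rfl | ⟨l, w, rfl⟩
    · simp [stripLoopA_nil, popPairs_nil]
    · have hwmem := hg.2 w (List.mem_append_right _ (by simp))
      have hwcls : runCls w = false := hlast w (by simp)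
      have hwns : ∀ c ∈ w, PySem.Chars.isspace c = false := fun c hc => hwcls ▸ hwmem.2 c hc
      have hwne : w ≠ [] := hwmem.1
      rcases List.eq_nil_or_concat' l with rfl | ⟨p, x, rfl⟩
      · -- single word, no preceding run: nothing matches
        simp only [List.nil_append, List.flatten_cons, List.flatten_nil, List.append_nil]
        obtain ⟨f', rfl⟩ : ∃ f', f = f' + 1 := by
          cases f with
          | zero => simp at hf
          | succ f' => exact ⟨f', rfl⟩
        rw [stripLoopA, if_neg hwne, popPairs_single]
        have hfn : formatTokens.find? (fun t => PySem.Chars.endswith (PySem.Chars.upper w) (' ' :: t)) = none := by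
          rw [List.find?_eq_none]
          intro t _ hp
          rw [PySem.Chars.endswith_iff] at hp
          have hsp : ' ' ∈ PySem.Chars.upper w := hp.subset List.mem_cons_self
          exact absurd (hwns ' ' ((mem_space_upper_iff w).1 hsp)) (by decide)
        rw [hfn]
        simp [List.flatten]
      · -- rs = p ++ [x, w]
        have hps : p ++ [x] ++ [w] = p ++ [x, w] := by simp
        rw [hps] at hg hlast hn hf ⊢
        obtain ⟨hgp, hjunc, hxw, ⟨hxne, hxsp⟩, -⟩ := goodRuns_concat_parts p x w hg
        have hxcls : runCls x = true := by
          cases hcx : runCls x with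
          | true => rfl
          | false => rw [hcx, hwcls] at hxw; exact absurd rfl hxw
        have hxws : ∀ c ∈ x, PySem.Chars.isspace c = true := fun c hc => hxcls ▸ hxsp c hc
        have hplast : ∀ r ∈ p.getLast?, runCls r = false := by
          intro r hr
          have hj := hjunc r hr
          rw [hxcls] at hj
          cases hcr : runCls r with
          | false => rfl
          | true => rw [hcr] at hj; exact absurd rfl hj
        -- decompose x = xd ++ [c]
        rcases List.eq_nil_or_concat' x with rfl | ⟨xd, c, rfl⟩
        · exact absurd rfl hxne
        have hcs : PySem.Chars.isspace c = true := hxws c (by simp)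
        have hxdws : ∀ a ∈ xd, PySem.Chars.isspace a = true := fun a ha => hxws a (by simp [ha])
        have hflat : (p ++ [xd ++ [c], w]).flatten = (p.flatten ++ xd) ++ c :: w := by
          simp
        obtain ⟨f', rfl⟩ : ∃ f', f = f' + 1 := by
          cases f with
          | zero => simp at hf
          | succ f' => exact ⟨f', rfl⟩
        have hsne : (p ++ [xd ++ [c], w]).flatten ≠ [] := by
          rw [hflat]; simp
        rw [stripLoopA, if_neg hsne]
        by_cases hc : c = ' '
        · subst hc
          -- separator ends with a literal space: A's endswith test reduces to token membership
          have hwupz : ' ' ∉ PySem.Chars.upper w := by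
            intro hsp
            exact absurd (hwns ' ' ((mem_space_upper_iff w).1 hsp)) (by decide)
          have hups : PySem.Chars.upper ((p.flatten ++ xd) ++ ' ' :: w)
              = PySem.Chars.upper (p.flatten ++ xd) ++ ' ' :: PySem.Chars.upper w := by
            rw [upper_append_split, (upperChar_eq_space_iff ' ').2 rfl]
          rw [hflat, hups, find?_tokens formatTokens _ _ tokens_no_space hwupz]
          by_cases hm : PySem.Chars.upper w ∈ formatTokens
          · rw [if_pos hm]
            simp only []
            have hlen : (PySem.Chars.upper w).length = w.length := by simp [PySem.Chars.upper]
            have hslice : PySem.Chars.slice ((p.flatten ++ xd) ++ ' ' :: w) none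
                (some (-(((PySem.Chars.upper w).length : Int) + 1))) = p.flatten ++ xd := by
              rw [PySem.Chars.slice_eq_listSlice, hlen]
              exact slice_take_split _ w
            rw [hslice, rstrip_append_ws _ _ hxdws,
              rstrip_eq_self _ (flatten_getLast_ne_space p hgp hplast)]
            rw [popPairs_concat_pos p (xd ++ [' ']) w ⟨hm, by simp⟩]
            exact ih p f' (by simp at hn; omega) hgp hplast (by simp at hf; omega)
          · rw [if_neg hm]
            rw [popPairs_concat_neg p (xd ++ [' ']) w (by simp) (fun hcc => hm hcc.1)]
            rw [hflat]
        · -- separator's last char is whitespace but not ' ': nothing matches on either side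
          have hfn : formatTokens.find?
              (fun t => PySem.Chars.endswith (PySem.Chars.upper ((p ++ [xd ++ [c], w]).flatten)) (' ' :: t)) = none := by
            rw [List.find?_eq_none]
            intro t htm hp
            rw [PySem.Chars.endswith_iff] at hp
            rw [hflat, upper_append_split] at hp
            refine not_suffix_space_sep _ _ _ _ ?_ ?_ ?_ ?_ hp
            · intro hce; exact hc ((upperChar_eq_space_iff c).1 hce)
            · rw [isspace_upperChar]; exact hcs
            · intro a ha
              simp only [PySem.Chars.upper, List.mem_map] at ha
              obtain ⟨b, hb, rfl⟩ := ha
              rw [isspace_upperChar]; exact hwns b hb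
            · exact tokens_no_ws t htm
          rw [hfn]
          rw [popPairs_concat_neg p (xd ++ [c]) w (by simp)
            (fun hcc => by rw [List.getLast?_concat] at hcc; simp at hcc; exact hc hcc.2)]

-- fold invariants for stage 1 of B
def RunsInv (st : List (List Char) × List Char) : Prop :=
  GoodRuns st.1 ∧ (∀ c ∈ st.2, PySem.Chars.isspace c = runCls st.2) ∧
  (st.2 = [] → st.1 = []) ∧
  (st.2 ≠ [] → ∀ r ∈ st.1.getLast?, runCls r ≠ runCls st.2)

theorem runCls_append_singleton (cur : List Char) (c : Char) (h : cur ≠ []) :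
    runCls (cur ++ [c]) = runCls cur := by
  cases cur with
  | nil => exact absurd rfl h
  | cons a l => simp [runCls]

theorem runCls_singleton (c : Char) : runCls [c] = PySem.Chars.isspace c := rfl

theorem goodRuns_nil : GoodRuns [] := ⟨by simp, by simp⟩

theorem goodRuns_flush (runs : List (List Char)) (cur : List Char)
    (hg : GoodRuns runs) (hcur : cur ≠ []) (hhom : ∀ c ∈ cur, PySem.Chars.isspace c = runCls cur)
    (hj : ∀ r ∈ runs.getLast?, runCls r ≠ runCls cur) :
    GoodRuns (runs ++ [cur]) := by
  constructor
  · rw [List.isChain_append]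
    exact ⟨hg.1, by simp, fun a ha b hb => by simp at hb; subst hb; exact hj a ha⟩
  · intro r hr
    rcases List.mem_append.1 hr with h | h
    · exact hg.2 r h
    · simp at h; subst h; exact ⟨hcur, hhom⟩

theorem getLastD_eq_getLast (l : List Char) (h : l ≠ []) (d : Char) :
    l.getLastD d = l.getLast h := by
  rw [List.getLastD_eq_getLast?, List.getLast?_eq_some_getLast h]; rfl

theorem runsInv_fold (s : List Char) : RunsInv (s.foldl runStep ([], [])) ∧
    ((s.foldl runStep ([], [])).1.flatten ++ (s.foldl runStep ([], [])).2 = s) := by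
  induction s using List.reverseRecOn with
  | nil => exact ⟨⟨goodRuns_nil, by simp, fun _ => rfl, by simp⟩, rfl⟩
  | append_singleton s c ih =>
    obtain ⟨⟨hg, hhom, hemp, hj⟩, hflat⟩ := ih
    rw [List.foldl_append, List.foldl_cons, List.foldl_nil]
    set st := s.foldl runStep ([], []) with hst
    unfold runStep
    by_cases hcond : st.2 ≠ [] ∧ PySem.Chars.isspace (st.2.getLastD ' ') ≠ PySem.Chars.isspace c
    · rw [if_pos hcond]
      obtain ⟨hcne, hdiff⟩ := hcond
      have hgl : PySem.Chars.isspace (st.2.getLastD ' ') = runCls st.2 := by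
        rw [getLastD_eq_getLast st.2 hcne]
        exact hhom _ (List.getLast_mem hcne)
      refine ⟨⟨goodRuns_flush st.1 st.2 hg hcne hhom (hj hcne), ?_, by simp, ?_⟩, ?_⟩
      · intro a ha; simp at ha; subst ha; rw [runCls_singleton]
      · intro _ r hr
        simp only [List.getLast?_concat] at hr
        simp at hr; subst hr
        rw [runCls_singleton, ← hgl]
        exact hdiff
      · show (st.1 ++ [st.2]).flatten ++ [c] = s ++ [c]
        simp only [List.flatten_append, List.flatten_cons, List.flatten_nil, List.append_nil]
        rw [hflat]
    · rw [if_neg hcond]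
      rw [not_and_or] at hcond
      by_cases hcne : st.2 = []
      · have hrn : st.1 = [] := hemp hcne
        rw [hcne, hrn]
        have hs : s = [] := by rw [hrn, hcne] at hflat; simpa using hflat
        subst hs
        refine ⟨⟨goodRuns_nil, ?_, by simp, by simp⟩, by simp⟩
        intro a ha; simp at ha; subst ha; simp [runCls_singleton]
      · have hds : PySem.Chars.isspace (st.2.getLastD ' ') = PySem.Chars.isspace c := by
          rcases hcond with h | h
          · exact absurd hcne (by simpa using h)
          · simpa using h
        have hsame : PySem.Chars.isspace c = runCls st.2 := by
          rw [← hds, getLastD_eq_getLast st.2 hcne]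
          exact hhom _ (List.getLast_mem hcne)
        have hclse : runCls (st.2 ++ [c]) = runCls st.2 := runCls_append_singleton st.2 c hcne
        refine ⟨⟨hg, ?_, by simp [hcne], ?_⟩, ?_⟩
        · intro a ha
          rcases List.mem_append.1 ha with h | h
          · rw [hclse]; exact hhom a h
          · simp at h; subst h; rw [hclse]; exact hsame
        · intro _ r hr
          rw [hclse]
          exact hj hcne r hr
        · show st.1.flatten ++ (st.2 ++ [c]) = s ++ [c]
          rw [← List.append_assoc, hflat]

theorem runsOf_spec (s : List Char)
    (hlast : ∀ h : s ≠ [], PySem.Chars.isspace (s.getLast h) = false) :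
    GoodRuns (runsOf s) ∧ (runsOf s).flatten = s ∧
      (∀ r ∈ (runsOf s).getLast?, runCls r = false) ∧
      (runsOf s).length ≤ s.length := by
  obtain ⟨⟨hg, hhom, hemp, hj⟩, hflat⟩ := runsInv_fold s
  unfold runsOf
  set st := s.foldl runStep ([], []) with hst
  by_cases hcne : st.2 ≠ []
  · rw [if_pos hcne]
    have hgo : GoodRuns (st.1 ++ [st.2]) := goodRuns_flush st.1 st.2 hg hcne hhom (hj hcne)
    have hfo : (st.1 ++ [st.2]).flatten = s := by
      simp only [List.flatten_append, List.flatten_cons, List.flatten_nil, List.append_nil]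
      exact hflat
    have hsne : s ≠ [] := by
      rw [← hflat]
      intro hq
      exact hcne (List.append_eq_nil_iff.mp hq).2
    have hfeq : st.1.flatten ++ st.2 = s := hflat
    have hlasteq : s.getLast hsne = st.2.getLast hcne := by
      rw [List.getLast_congr _ _ hfeq.symm]
      · exact List.getLast_append_of_ne_nil _ hcne
      · intro hq
        exact hcne (List.append_eq_nil_iff.mp hq).2
    have hsl : ∀ r ∈ (st.1 ++ [st.2]).getLast?, runCls r = false := by
      intro r hr
      simp only [List.getLast?_concat] at hr
      simp at hr; subst hr
      rw [← hhom _ (List.getLast_mem hcne), ← hlasteq]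
      exact hlast hsne
    refine ⟨hgo, hfo, hsl, ?_⟩
    have hle := length_le_flatten (st.1 ++ [st.2]) (fun r hr => (hgo.2 r hr).1)
    rw [hfo] at hle
    exact hle
  · rw [if_neg hcne]
    rw [not_not] at hcne
    have hrn : st.1 = [] := hemp hcne
    have hs : s = [] := by rw [hrn, hcne] at hflat; simpa using hflat
    subst hs
    rw [hrn]
    exact ⟨goodRuns_nil, by simp, by simp, by simp⟩

-- ===== VERDICT (by name: the statement is the Claim_ definition above) =====
theorem strip_format_suffix_spec : Claim_equal_strip_format_suffix := by
  intro text _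
  unfold Spec_strip_format_suffix strip_format_suffix strip_format_suffix_alt
  set s := PySem.Chars.rstrip text.toList with hs
  obtain ⟨hg, hflat, hlastw, hlen⟩ := runsOf_spec s (rstrip_last text.toList)
  have hmain := main_loop (runsOf s).length (runsOf s) (s.length + 1) le_rfl hg hlastw (by omega)
  rw [hflat] at hmain
  simp only [hmain]
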